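-- pv_equiv track=rewrite | github.com/2811907609/lixiang_code_clone | codebuddy/ai_agents/ai_agents/tools/parsers/regex_parser.py | _extract_js_decorators
-- ===== SOURCE A (Python) =====
-- from typing import List, Dict, Optional, Any
--
-- def _extract_js_decorators(lines: List[str], line_index: int) -> Optional[List[str]]:
--     """Extract JavaScript/TypeScript decorators above a declaration."""
--     if line_index < 0:
--         return None
--
--     decorators = []
--     i = line_index
--
--     while i >= 0:
--         line = lines[i].strip()
--         if line.startswith('@'):
--             decorators.insert(0, line)
--         elif line == '' or line.startswith('//') or line.startswith('/*'):
--             pass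
--         else:
--             break
--         i -= 1
--
--     return decorators if decorators else None
-- ===== SOURCE B (Python) =====
-- def _extract_js_decorators(lines, line_index):
--     """Extract JavaScript/TypeScript decorators above a declaration."""
--     if line_index < 0:
--         return None
--
--     def keep(s):
--         return (s.startswith('@') or s == ''
--                 or s.startswith('//') or s.startswith('/*'))
--
--     # Pass 1: walk up to the block boundary (first line that is not part of
--     # the decorator/comment/blank block), or -1 if the block reaches the top.
--     i = line_index
--     while i >= 0 and keep(lines[i].strip()):
--         i -= 1
--
--     # Pass 2: collect the '@' lines forward from the boundary.
--     decorators = [lines[j].strip()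
--                   for j in range(i + 1, line_index + 1)
--                   if lines[j].strip().startswith('@')]
--     return decorators or None
-- ===== Notes on version B (the rewrite author's own statement) =====
-- stated objective: alternative
-- what changed: Replaces the single upward scan that insert(0)s each decorator into the front of the list by a boundary-finding upward pass followed by a forward list-comprehension collection, so the result is built front-to-back with no front insertions.
import Mathlib
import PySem

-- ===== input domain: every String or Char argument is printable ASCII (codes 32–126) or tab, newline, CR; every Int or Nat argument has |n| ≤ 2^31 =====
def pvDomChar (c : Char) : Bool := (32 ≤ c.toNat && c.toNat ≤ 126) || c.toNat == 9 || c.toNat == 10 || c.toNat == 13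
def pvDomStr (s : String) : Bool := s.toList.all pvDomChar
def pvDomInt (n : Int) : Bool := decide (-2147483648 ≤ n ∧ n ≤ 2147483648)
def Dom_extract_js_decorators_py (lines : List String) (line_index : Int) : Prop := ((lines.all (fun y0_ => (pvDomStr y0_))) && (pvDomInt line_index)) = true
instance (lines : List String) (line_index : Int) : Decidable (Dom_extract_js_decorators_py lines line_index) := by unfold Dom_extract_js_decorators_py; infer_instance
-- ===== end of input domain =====

-- B rebuilds the result with a boundary-finding upward pass plus a forward collection
-- instead of A's single upward scan with insert(0); return values agree on Pre_.

-- shared one-liner: lines[i].strip() (default "" is never reached inside Pre_)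
def lineAt (lines : List String) (i : Nat) : String :=
  PySem.Str.strip ((PySem.List.pyGet? lines (Int.ofNat i)).getD "")

-- ===== PORT A =====
-- the while-loop of A: i counts down, decorators accumulated by insert(0)
def aLoop (lines : List String) : Nat → List String → List String
  | 0, decorators =>
      if PySem.Str.startswith (lineAt lines 0) "@" then lineAt lines 0 :: decorators
      else if lineAt lines 0 = "" || PySem.Str.startswith (lineAt lines 0) "//" ||
              PySem.Str.startswith (lineAt lines 0) "/*" then decorators
      else decorators
  | i + 1, decorators =>
      if PySem.Str.startswith (lineAt lines (i + 1)) "@" then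
        aLoop lines i (lineAt lines (i + 1) :: decorators)
      else if lineAt lines (i + 1) = "" || PySem.Str.startswith (lineAt lines (i + 1)) "//" ||
              PySem.Str.startswith (lineAt lines (i + 1)) "/*" then aLoop lines i decorators
      else decorators

def extract_js_decorators_py (lines : List String) (line_index : Int) : Option (List String) :=
  if line_index < 0 then none
  else
    let decorators := aLoop lines line_index.toNat []
    if decorators = [] then none else some decorators

-- ===== PORT B =====
def keepB (s : String) : Bool :=
  PySem.Str.startswith s "@" || s = "" ||
  PySem.Str.startswith s "//" || PySem.Str.startswith s "/*"

-- pass 1 of B: walk up to the boundary index (or -1)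
def bBoundary (lines : List String) : Nat → Int
  | 0 => if keepB (lineAt lines 0) then -1 else 0
  | i + 1 => if keepB (lineAt lines (i + 1)) then bBoundary lines i else ((i : Int) + 1)

-- pass 2 of B: the list comprehension over range(j, j+n)
def bCollect (lines : List String) (j : Nat) (n : Nat) : List String :=
  match n with
  | 0 => []
  | n' + 1 =>
      (if PySem.Str.startswith (lineAt lines j) "@" then [lineAt lines j] else []) ++
      bCollect lines (j + 1) n'

def extract_js_decorators_py_alt (lines : List String) (line_index : Int) : Option (List String) :=
  if line_index < 0 then none
  else
    let i := line_index.toNat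
    let start := (bBoundary lines i + 1).toNat
    let decorators := bCollect lines start (i + 1 - start)
    if decorators = [] then none else some decorators

-- ===== PRECONDITION & SPEC =====
-- Pre_ excludes line_index ≥ len(lines) (with line_index ≥ 0), where the Python A raises IndexError.
def Pre_extract_js_decorators_py (lines : List String) (line_index : Int) : Prop :=
  line_index < (lines.length : Int)
instance (lines : List String) (line_index : Int) : Decidable (Pre_extract_js_decorators_py lines line_index) := by unfold Pre_extract_js_decorators_py; infer_instance

def pvWitness_extract_js_decorators_py : List String × Int := (["@dec", "function f(){"], 0)

def Spec_extract_js_decorators_py (lines : List String) (line_index : Int) (out : Option (List String)) : Prop := out = extract_js_decorators_py_alt lines line_index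
instance (lines : List String) (line_index : Int) (out : Option (List String)) : Decidable (Spec_extract_js_decorators_py lines line_index out) := by unfold Spec_extract_js_decorators_py; infer_instance

-- ===== CLAIM (what is proved, stated in full; the proofs are below) =====
def Claim_equal_extract_js_decorators_py : Prop := ∀ (lines : List String) (line_index : Int), Dom_extract_js_decorators_py lines line_index → Pre_extract_js_decorators_py lines line_index → Spec_extract_js_decorators_py lines line_index (extract_js_decorators_py lines line_index)

-- ===== LEMMAS AND PROOFS =====

-- accumulator lemma for A's loop
theorem aLoop_acc (lines : List String) : ∀ (i : Nat) (dec : List String),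
    aLoop lines i dec = aLoop lines i [] ++ dec := by
  intro i
  induction i with
  | zero =>
      intro dec
      simp only [aLoop]
      split_ifs <;> simp
  | succ i' ih =>
      intro dec
      simp only [aLoop]
      split_ifs with h1 h2
      · rw [ih (lineAt lines (i' + 1) :: dec), ih [lineAt lines (i' + 1)]]
        simp
      · exact ih dec
      · simp

theorem bBoundary_bounds (lines : List String) : ∀ (i : Nat),
    -1 ≤ bBoundary lines i ∧ bBoundary lines i ≤ (i : Int) := by
  intro i
  induction i with
  | zero => simp only [bBoundary]; split_ifs <;> simp
  | succ i' ih =>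
      simp only [bBoundary]
      split_ifs with h
      · exact ⟨ih.1, by omega⟩
      · omega

theorem bCollect_snoc (lines : List String) : ∀ (n j : Nat),
    bCollect lines j (n + 1) =
      bCollect lines j n ++
        (if PySem.Str.startswith (lineAt lines (j + n)) "@" then [lineAt lines (j + n)] else []) := by
  intro n
  induction n with
  | zero => intro j; simp [bCollect]
  | succ n' ih =>
      intro j
      have h1 : bCollect lines j (n' + 1 + 1) =
          (if PySem.Str.startswith (lineAt lines j) "@" then [lineAt lines j] else []) ++
            bCollect lines (j + 1) (n' + 1) := rfl
      have h2 : bCollect lines j (n' + 1) =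
          (if PySem.Str.startswith (lineAt lines j) "@" then [lineAt lines j] else []) ++
            bCollect lines (j + 1) n' := rfl
      have hjn : j + 1 + n' = j + (n' + 1) := by omega
      rw [h1, ih (j + 1), hjn, h2, List.append_assoc]

set_option maxHeartbeats 1000000 in
theorem main_eq (lines : List String) : ∀ (i : Nat),
    aLoop lines i [] =
      bCollect lines (bBoundary lines i + 1).toNat (i + 1 - (bBoundary lines i + 1).toNat) := by
  intro i
  induction i with
  | zero =>
      simp only [aLoop, bBoundary, keepB]
      split_ifs with h1 h2 <;> simp_all [bCollect]
  | succ i' ih =>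
      have hb := bBoundary_bounds lines i'
      have hstart : (bBoundary lines i' + 1).toNat ≤ i' + 1 := by omega
      have hn : i' + 1 + 1 - (bBoundary lines i' + 1).toNat
          = (i' + 1 - (bBoundary lines i' + 1).toNat) + 1 := by omega
      have hj : (bBoundary lines i' + 1).toNat + (i' + 1 - (bBoundary lines i' + 1).toNat)
          = i' + 1 := by omega
      by_cases h1 : PySem.Str.startswith (lineAt lines (i' + 1)) "@" = true
      · -- '@' line: keepB holds
        have hk : keepB (lineAt lines (i' + 1)) = true := by
          simp only [keepB, h1, Bool.true_or]
        have hA : aLoop lines (i' + 1) [] = aLoop lines i' [lineAt lines (i' + 1)] := by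
          simp only [aLoop]; rw [if_pos h1]
        have hB : bBoundary lines (i' + 1) = bBoundary lines i' := by
          simp only [bBoundary]; rw [if_pos hk]
        rw [hA, aLoop_acc, ih, hB, hn, bCollect_snoc, hj, if_pos h1]
      · by_cases h2 : (decide (lineAt lines (i' + 1) = "") ||
            PySem.Str.startswith (lineAt lines (i' + 1)) "//" ||
            PySem.Str.startswith (lineAt lines (i' + 1)) "/*") = true
        · -- comment/blank line: keepB holds, nothing collected at i'+1
          have hk : keepB (lineAt lines (i' + 1)) = true := by
            simp only [keepB, Bool.or_assoc]
            simp only [Bool.or_assoc] at h2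
            rw [h2, Bool.or_true]
          have hA : aLoop lines (i' + 1) [] = aLoop lines i' [] := by
            simp only [aLoop]; rw [if_neg h1, if_pos h2]
          have hB : bBoundary lines (i' + 1) = bBoundary lines i' := by
            simp only [bBoundary]; rw [if_pos hk]
          rw [hA, ih, hB, hn, bCollect_snoc, hj, if_neg h1]
          simp
        · -- boundary here: both yield []
          have hk : keepB (lineAt lines (i' + 1)) = false := by
            simp only [Bool.not_eq_true] at h1 h2
            simp only [keepB, h1, Bool.false_or, h2]
          have hA : aLoop lines (i' + 1) [] = [] := by
            simp only [aLoop]; rw [if_neg h1, if_neg h2]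
          have hB : bBoundary lines (i' + 1) = ((i' : Int) + 1) := by
            simp only [bBoundary]; rw [if_neg (by simp [hk])]
          rw [hA, hB]
          have h3 : ((i' : Int) + 1 + 1).toNat = i' + 2 := by omega
          simp [h3, bCollect]

-- ===== VERDICT (by name: the statement is the Claim_ definition above) =====
theorem extract_js_decorators_py_spec : Claim_equal_extract_js_decorators_py := by
  intro lines line_index _ _
  unfold Spec_extract_js_decorators_py extract_js_decorators_py extract_js_decorators_py_alt
  split_ifs with h
  · rfl
  · rw [main_eq]
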